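-- pv_equiv track=rewrite | github.com/Espebaum/Algorithm | 프로그래머스/0/181829. 이차원 배열 대각선 순회하기/이차원 배열 대각선 순회하기.py | solution
-- ===== SOURCE A (Python) =====
-- def solution(board, k):
--     s = 0
--     r = len(board)
--     c = len(board[0])
--     for i in range(r):
--         for j in range(c):
--             if i+j <= k:
--                 s += board[i][j]
--     return s
-- ===== SOURCE B (Python) =====
-- def solution(board, k):
--     # sum, per row i, the prefix of the first c columns whose cells satisfy i+j <= k,
--     # i.e. row[:min(c, k-i+1)] -- no inner per-cell predicate loop
--     c = len(board[0])
--     return sum(sum(row[:max(0, min(c, k - i + 1))]) for i, row in enumerate(board))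
-- ===== Notes on version B (the rewrite author's own statement) =====
-- stated objective: simpler
-- what changed: Replaces the full r*c scan with a per-cell predicate by one prefix slice per row (row[:min(c, k-i+1)]), summing exactly the cells with i+j<=k with no inner conditional loop (slice+sum run at C level).
import Mathlib
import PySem

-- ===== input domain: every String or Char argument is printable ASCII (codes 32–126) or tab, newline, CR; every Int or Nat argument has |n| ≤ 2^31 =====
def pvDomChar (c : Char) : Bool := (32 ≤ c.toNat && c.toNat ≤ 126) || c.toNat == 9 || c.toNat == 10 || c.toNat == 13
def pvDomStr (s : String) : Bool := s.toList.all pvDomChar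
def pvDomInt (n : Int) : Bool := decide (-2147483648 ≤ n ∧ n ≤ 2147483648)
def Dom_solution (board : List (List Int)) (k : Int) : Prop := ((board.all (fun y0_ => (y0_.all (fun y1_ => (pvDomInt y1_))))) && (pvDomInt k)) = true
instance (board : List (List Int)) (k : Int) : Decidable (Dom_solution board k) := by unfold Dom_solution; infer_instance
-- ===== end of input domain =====

-- B changes the decomposition: instead of A's full r×c scan with a per-cell predicate,
-- B sums, per row i, the prefix slice row[:max(0, min(c, k-i+1))] (exactly the cells with
-- i+j ≤ k among the first c columns). Neither version mutates its arguments.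

-- ===== PORT A =====
def solution (board : List (List Int)) (k : Int) : Int :=
  let r : Int := board.length
  let c : Int := (PySem.List.pyGetD board 0 []).length   -- board[0]: raises on empty board (excluded by Pre_)
  (PySem.List.pyRange 0 r).foldl
    (fun s i =>
      (PySem.List.pyRange 0 c).foldl
        (fun s j =>
          if i + j ≤ k then s + PySem.List.pyGetD (PySem.List.pyGetD board i []) j 0 else s)
        s)
    0

-- ===== PORT B =====
def solution_alt (board : List (List Int)) (k : Int) : Int :=
  let c : Int := (PySem.List.pyGetD board 0 []).length   -- board[0]: raises on empty board (excluded by Pre_)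
  ((PySem.List.enumerate board).map
    (fun p => (PySem.List.slice p.2 none (some (max 0 (min c (k - p.1 + 1))))).sum)).sum

-- ===== PRECONDITION & SPEC =====
-- Pre_ excludes exactly the inputs where A (and B) raise IndexError: the empty board
-- (board[0]) and ragged boards where some row i shorter than row 0's width c is indexed
-- past its end, i.e. len(row_i) < c and i + len(row_i) ≤ k.
def Pre_solution (board : List (List Int)) (k : Int) : Prop :=
  board ≠ [] ∧ ∀ p ∈ PySem.List.enumerate board,
    ((p.2.length : Int) < ((board.headD []).length : Int) → k < p.1 + p.2.length)
instance (board : List (List Int)) (k : Int) : Decidable (Pre_solution board k) := by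
  unfold Pre_solution; infer_instance
def pvWitness_solution : List (List Int) × Int := ([[1, 2], [3, 4]], 2)

def Spec_solution (board : List (List Int)) (k : Int) (out : Int) : Prop := out = solution_alt board k
instance (board : List (List Int)) (k : Int) (out : Int) : Decidable (Spec_solution board k out) := by unfold Spec_solution; infer_instance

-- ===== CLAIM (what is proved, stated in full; the proofs are below) =====
def Claim_equal_solution : Prop := ∀ (board : List (List Int)) (k : Int), Dom_solution board k → Pre_solution board k → Spec_solution board k (solution board k)

-- ===== LEMMAS AND PROOFS =====

-- Row lemma: summing row[j] over the first c columns with i+j ≤ k equals summing the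
-- prefix of length min c (k-i+1), provided the loop never indexes past the row's end.
theorem pv_row (row : List Int) (c : Nat) (i k : Int)
    (h : row.length < c → k - i + 1 ≤ (row.length : Int)) :
    ((List.range c).map (fun (j : Nat) => if i + (j : Int) ≤ k then row.getD j 0 else 0)).sum
      = (row.take (min (c : Int) (max 0 (k - i + 1))).toNat).sum := by
  induction row generalizing c i with
  | nil => simp [List.getD]
  | cons a tl ih =>
    cases c with
    | zero => simp
    | succ c' =>
      rw [List.range_succ_eq_map, List.map_cons, List.map_map, List.sum_cons]
      have h2 : ((List.range c').map
            ((fun (j : Nat) => if i + (j : Int) ≤ k then (a :: tl).getD j 0 else 0) ∘ Nat.succ)).sum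
          = ((List.range c').map
            (fun (j : Nat) => if (i + 1) + (j : Int) ≤ k then tl.getD j 0 else 0)).sum := by
        congr 1
        apply List.map_congr_left
        intro j _
        have hc : (i + ((j.succ : Nat) : Int) ≤ k) ↔ ((i + 1) + (j : Int) ≤ k) := by
          push_cast; omega
        simp only [Function.comp, List.getD_cons_succ]
        by_cases hj : (i + 1) + (j : Int) ≤ k
        · rw [if_pos (hc.mpr hj), if_pos hj]
        · rw [if_neg (fun hh => hj (hc.mp hh)), if_neg hj]
      have hyp : tl.length < c' → k - (i + 1) + 1 ≤ (tl.length : Int) := by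
        intro hlt
        have := h (by simpa using Nat.succ_lt_succ hlt)
        simp only [List.length_cons] at this
        push_cast at this ⊢
        omega
      rw [h2, ih c' (i + 1) hyp]
      by_cases h0 : 0 ≤ k - i
      · have ht : (min (((c' + 1 : Nat)) : Int) (max 0 (k - i + 1))).toNat
            = (min ((c' : Nat) : Int) (max 0 (k - (i + 1) + 1))).toNat + 1 := by
          push_cast; omega
        rw [ht, List.take_succ_cons, List.sum_cons, if_pos (by omega), List.getD_cons_zero]
      · have h1 : (min (((c' + 1 : Nat)) : Int) (max 0 (k - i + 1))).toNat = 0 := by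
          push_cast; omega
        have h2' : (min ((c' : Nat) : Int) (max 0 (k - (i + 1) + 1))).toNat = 0 := by
          omega
        rw [if_neg (by omega), h1, h2']
        simp

-- Inner loop of A over one row equals adding that row's clamped prefix sum.
theorem pv_inner (row : List Int) (cN : Nat) (i k s : Int)
    (h : row.length < cN → k - i + 1 ≤ (row.length : Int)) :
    (PySem.List.pyRange 0 (cN : Int)).foldl
        (fun s j => if i + j ≤ k then s + PySem.List.pyGetD row j 0 else s) s
      = s + (row.take (min ((cN : Nat) : Int) (max 0 (k - i + 1))).toNat).sum := by
  have hfun : (fun (s j : Int) => if i + j ≤ k then s + PySem.List.pyGetD row j 0 else s)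
      = fun s j => s + (if i + j ≤ k then PySem.List.pyGetD row j 0 else 0) := by
    funext s j; split <;> simp
  rw [hfun, PySem.List.foldl_add, PySem.List.pyRange_one]
  have hlen : (((cN : Nat) : Int) - 0).toNat = cN := by omega
  rw [hlen, List.map_map]
  have hmap : ((List.range cN).map
        ((fun j => if i + j ≤ k then PySem.List.pyGetD row j 0 else 0) ∘ fun n : Nat => (0 : Int) + n))
      = (List.range cN).map (fun (j : Nat) => if i + (j : Int) ≤ k then row.getD j 0 else 0) := by
    apply List.map_congr_left
    intro j _
    simp [Function.comp, PySem.List.pyGetD_natCast]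
  rw [hmap, pv_row row cN i k h]

theorem pv_main (board : List (List Int)) (k : Int) (hpre : Pre_solution board k) :
    solution board k = solution_alt board k := by
  obtain ⟨hne, hrag⟩ := hpre
  unfold solution solution_alt
  simp only []
  rw [PySem.List.enumerate_eq_map_pyRange board [], List.map_map]
  have hlen : PySem.List.len board = (board.length : Int) := by
    simp [PySem.List.len]
  rw [hlen]
  have hc0 : ((PySem.List.pyGetD board 0 []).length : Int) = ((board.headD [] : List Int).length : Int) := by
    rw [PySem.List.pyGetD_zero]
    cases board with
    | nil => exact absurd rfl hne
    | cons b bs => simp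
  rw [PySem.List.foldl_congr_mem (PySem.List.pyRange 0 (board.length : Int)) _
    (fun s i => s + ((PySem.List.pyGetD board i []).take
      (min (((PySem.List.pyGetD board 0 []).length : Nat) : Int) (max 0 (k - i + 1))).toNat).sum) 0 ?_]
  · rw [PySem.List.foldl_add, Int.zero_add]
    congr 1
    apply List.map_congr_left
    intro i _
    have h0 : (0 : Int) ≤ max 0 (min ((PySem.List.pyGetD board 0 []).length : Int) (k - i + 1)) :=
      le_max_left _ _
    simp only [Function.comp]
    rw [PySem.List.slice_to _ h0]
    have : (max 0 (min ((PySem.List.pyGetD board 0 []).length : Int) (k - i + 1))).toNat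
        = (min (((PySem.List.pyGetD board 0 []).length : Nat) : Int) (max 0 (k - i + 1))).toNat := by
      omega
    rw [this]
  · intro acc i hi
    have hmem : (i, PySem.List.pyGetD board i []) ∈ PySem.List.enumerate board := by
      rw [PySem.List.enumerate_eq_map_pyRange board [], hlen]
      exact List.mem_map_of_mem hi
    have hrow := hrag _ hmem
    dsimp only at hrow
    have hh : (PySem.List.pyGetD board i []).length < (PySem.List.pyGetD board 0 []).length →
        k - i + 1 ≤ ((PySem.List.pyGetD board i []).length : Int) := by
      intro hlt
      have hx : ((PySem.List.pyGetD board i []).length : Int)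
          < (((board.headD [] : List Int)).length : Int) := by
        rw [← hc0]; exact_mod_cast hlt
      have := hrow hx
      omega
    exact pv_inner (PySem.List.pyGetD board i []) (PySem.List.pyGetD board 0 []).length i k acc hh

-- ===== VERDICT (by name: the statement is the Claim_ definition above) =====
theorem solution_spec : Claim_equal_solution := by
  intro board k _ hpre
  unfold Spec_solution
  exact pv_main board k hpre
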